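-- pv_equiv track=rewrite | github.com/anon347/tot-q | besser/utilities/web_modeling_editor/backend/services/sugiyama_layout.py | _spread_dense_layers
-- ===== SOURCE A (Python) =====
-- from typing import Dict, List, Tuple, Set, Optional
-- from collections import defaultdict, deque
--
-- def _spread_dense_layers(node_layers: Dict[str, int], max_per_layer: int = 4, graph: Dict = None) -> Dict[str, int]:
--     """
--     Spread out layers that have too many nodes to improve vertical distribution.
--     IMPROVED: Uses relationship density to keep highly-connected nodes together.
--     """
--     # Count nodes per layer
--     layer_counts = defaultdict(list)
--     for node, layer in node_layers.items():
--         layer_counts[layer].append(node)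
--
--     # Redistribute nodes from dense layers
--     new_node_layers = {}
--     layer_offset = 0
--
--     for layer in sorted(layer_counts.keys()):
--         nodes_in_layer = layer_counts[layer]
--
--         if len(nodes_in_layer) <= max_per_layer:
--             # Keep layer as is
--             for node in nodes_in_layer:
--                 new_node_layers[node] = layer + layer_offset
--         else:
--             # Split into multiple sub-layers
--             # IMPROVED: Sort nodes by relationship density (connection count) before splitting
--             # This keeps highly-connected nodes together in earlier sublayers
--             if graph:
--                 # Calculate connection count for each node (both in and out)
--                 node_connection_counts = []
--                 for node in nodes_in_layer:
--                     connection_count = len(graph.get('edges_in', {}).get(node, [])) + len(graph.get('edges_out', {}).get(node, []))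
--                     node_connection_counts.append((node, connection_count))
--
--                 # Sort by connection count (descending) - most connected first
--                 node_connection_counts.sort(key=lambda x: -x[1])
--                 sorted_nodes = [node for node, _ in node_connection_counts]
--             else:
--                 # Fallback: use original order
--                 sorted_nodes = nodes_in_layer
--
--             num_sublayers = (len(sorted_nodes) + max_per_layer - 1) // max_per_layer
--             for i, node in enumerate(sorted_nodes):
--                 sublayer = i // max_per_layer
--                 new_node_layers[node] = layer + layer_offset + sublayer
--
--             # Add offset for next layers
--             layer_offset += num_sublayers - 1
--
--     return new_node_layers
-- ===== SOURCE B (Python) =====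
-- def _spread_dense_layers(node_layers, max_per_layer=4, graph=None):
--     # Group nodes by layer.
--     groups = {}
--     for node, layer in node_layers.items():
--         groups.setdefault(layer, []).append(node)
--
--     def degree(node):
--         return len(graph.get('edges_in', {}).get(node, [])) + len(graph.get('edges_out', {}).get(node, []))
--
--     # Recursively emit (node, new_layer) pairs for the sorted layers.  There is no
--     # sparse/dense branch for the assignment: every layer k with (possibly reordered)
--     # nodes and running offset `off` maps its i-th node to k + off + i // max_per_layer,
--     # and contributes ceil(len/max_per_layer) - 1 extra sublayers to the offset —
--     # for a layer that fits this is 0 and i // max_per_layer is 0, so it degenerates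
--     # to the unsplit case.
--     def emit(keys, off):
--         if not keys:
--             return []
--         k = keys[0]
--         nodes = groups[k]
--         if graph and len(nodes) > max_per_layer:
--             nodes = sorted(nodes, key=degree, reverse=True)
--         num = (len(nodes) + max_per_layer - 1) // max_per_layer
--         return [(n, k + off + i // max_per_layer) for i, n in enumerate(nodes)] \
--             + emit(keys[1:], off + num - 1)
--
--     return dict(emit(sorted(groups), 0))
-- ===== Notes on version B (the rewrite author's own statement) =====
-- stated objective: alternative
-- what changed: A loops imperatively over sorted layers with a mutable result dict, a threaded layer_offset and separate keep/split branches (building and sorting (node,count) pairs in the dense case); B recursively emits a flat list of (node, new_layer) pairs over the tail of the key list, assigns every layer uniformly as k + off + i//max_per_layer with offset increment ceil(len/max)-1 (the unsplit branch disappears as the num==1 degenerate case), sorts dense nodes directly with key=degree reverse=True, and builds the dict once at the end.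
import Mathlib
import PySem

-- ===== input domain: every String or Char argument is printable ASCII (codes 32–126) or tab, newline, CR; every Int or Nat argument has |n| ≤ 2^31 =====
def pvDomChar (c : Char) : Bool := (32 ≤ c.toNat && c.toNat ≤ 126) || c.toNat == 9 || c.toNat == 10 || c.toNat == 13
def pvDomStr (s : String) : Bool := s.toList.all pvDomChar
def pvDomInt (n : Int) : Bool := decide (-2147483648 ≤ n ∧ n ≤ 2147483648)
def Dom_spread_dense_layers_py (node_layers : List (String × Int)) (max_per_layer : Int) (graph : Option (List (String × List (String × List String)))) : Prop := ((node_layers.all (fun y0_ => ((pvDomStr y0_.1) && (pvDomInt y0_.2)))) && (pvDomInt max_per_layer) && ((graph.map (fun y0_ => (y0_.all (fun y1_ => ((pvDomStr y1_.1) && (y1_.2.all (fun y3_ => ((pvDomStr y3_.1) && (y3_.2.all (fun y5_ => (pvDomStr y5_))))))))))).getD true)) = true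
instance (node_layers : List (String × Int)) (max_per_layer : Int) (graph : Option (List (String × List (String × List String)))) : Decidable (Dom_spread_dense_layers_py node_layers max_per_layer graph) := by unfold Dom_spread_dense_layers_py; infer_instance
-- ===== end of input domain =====

-- B replaces A's imperative loop (mutable dict, threaded layer_offset, keep/split branches)
-- by a recursion over the sorted key list that emits a flat pair list with ONE uniform
-- assignment formula per layer, then builds the dict once (objective: alternative).

-- ===== PORT A =====
-- grouping pass shared verbatim by Source A and Source B (defaultdict-append resp. setdefault-append)
def pvGroup (node_layers : List (String × Int)) : PySem.Dict Int (List String) :=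
  (PySem.Dict.ofList node_layers).items.foldl
    (fun d p => d.modify p.2 [] (· ++ [p.1])) PySem.Dict.empty

-- connection count, identical expression in Source A and Source B:
-- len(graph.get('edges_in', {}).get(node, [])) + len(graph.get('edges_out', {}).get(node, []))
def pvConn (g : List (String × List (String × List String))) (node : String) : Int :=
  ((PySem.Dict.ofList ((PySem.Dict.ofList g).getD "edges_in" [])).getD node []).length
  + ((PySem.Dict.ofList ((PySem.Dict.ofList g).getD "edges_out" [])).getD node []).length

-- A's loop body: one layer processed, threading (new_node_layers, layer_offset)
def pvStepA (lc : PySem.Dict Int (List String)) (max_per_layer : Int)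
    (graph : Option (List (String × List (String × List String))))
    (st : PySem.Dict String Int × Int) (layer : Int) : PySem.Dict String Int × Int :=
  let nodes_in_layer := lc.getD layer []
  if (nodes_in_layer.length : Int) ≤ max_per_layer then
    (nodes_in_layer.foldl (fun d node => d.insert node (layer + st.2)) st.1, st.2)
  else
    let sorted_nodes :=
      match graph with
      | some g =>
          if g.isEmpty then nodes_in_layer  -- 'if graph:' false on the empty dict
          else
            let ncc := nodes_in_layer.map (fun node => (node, pvConn g node))
            (PySem.List.sorted ncc (fun x => -x.2) false).map (·.1)
      | none => nodes_in_layer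
    let num_sublayers := PySem.Int.floordiv ((sorted_nodes.length : Int) + max_per_layer - 1) max_per_layer
    ((PySem.List.enumerate sorted_nodes).foldl
        (fun d p => d.insert p.2 (layer + st.2 + PySem.Int.floordiv p.1 max_per_layer)) st.1,
     st.2 + (num_sublayers - 1))

def spread_dense_layers_py (node_layers : List (String × Int)) (max_per_layer : Int) (graph : Option (List (String × List (String × List String)))) : List (String × Int) :=
  let lc := pvGroup node_layers
  ((PySem.List.sorted lc.keys (fun x => x) false).foldl
      (pvStepA lc max_per_layer graph) (PySem.Dict.empty, 0)).1.items

-- ===== PORT B =====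
-- the layer's node list after Source B's 'if graph and len(nodes) > max_per_layer: sorted(..., key=degree, reverse=True)'
def pvLayerNodes (groups : PySem.Dict Int (List String)) (max_per_layer : Int)
    (graph : Option (List (String × List (String × List String)))) (k : Int) : List String :=
  let nodes := groups.getD k []
  match graph with
  | some g =>
      if !g.isEmpty && decide ((nodes.length : Int) > max_per_layer) then
        PySem.List.sorted nodes (fun n => pvConn g n) true
      else nodes
  | none => nodes

-- Source B's 'num = (len(nodes) + max_per_layer - 1) // max_per_layer'
def pvLayerNum (groups : PySem.Dict Int (List String)) (max_per_layer : Int)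
    (graph : Option (List (String × List (String × List String)))) (k : Int) : Int :=
  PySem.Int.floordiv (((pvLayerNodes groups max_per_layer graph k).length : Int) + max_per_layer - 1) max_per_layer

-- Source B's recursive emit: pairs of this layer ++ emit of the remaining keys
def pvEmit (groups : PySem.Dict Int (List String)) (max_per_layer : Int)
    (graph : Option (List (String × List (String × List String)))) :
    List Int → Int → List (String × Int)
  | [], _ => []
  | k :: ks, off =>
      (PySem.List.enumerate (pvLayerNodes groups max_per_layer graph k)).map
          (fun p => (p.2, k + off + PySem.Int.floordiv p.1 max_per_layer))
        ++ pvEmit groups max_per_layer graph ks (off + (pvLayerNum groups max_per_layer graph k - 1))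

def spread_dense_layers_py_alt (node_layers : List (String × Int)) (max_per_layer : Int) (graph : Option (List (String × List (String × List String)))) : List (String × Int) :=
  let groups := pvGroup node_layers
  (PySem.Dict.ofList
      (pvEmit groups max_per_layer graph (PySem.List.sorted groups.keys (fun x => x) false) 0)).items

-- ===== PRECONDITION & SPEC =====
-- Pre_ excludes exactly the inputs where Python A raises ZeroDivisionError:
-- max_per_layer == 0 with a nonempty node_layers makes every layer dense and 'i // 0' raises.
def Pre_spread_dense_layers_py (node_layers : List (String × Int)) (max_per_layer : Int) (graph : Option (List (String × List (String × List String)))) : Prop :=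
  max_per_layer ≠ 0 ∨ node_layers = []
instance (node_layers : List (String × Int)) (max_per_layer : Int) (graph : Option (List (String × List (String × List String)))) : Decidable (Pre_spread_dense_layers_py node_layers max_per_layer graph) := by unfold Pre_spread_dense_layers_py; infer_instance

def pvWitness_spread_dense_layers_py : (List (String × Int)) × Int × (Option (List (String × List (String × List String)))) :=
  ([("a", 0), ("b", 0), ("c", 0)], 2, none)

def Spec_spread_dense_layers_py (node_layers : List (String × Int)) (max_per_layer : Int) (graph : Option (List (String × List (String × List String)))) (out : List (String × Int)) : Prop := out = spread_dense_layers_py_alt node_layers max_per_layer graph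
instance (node_layers : List (String × Int)) (max_per_layer : Int) (graph : Option (List (String × List (String × List String)))) (out : List (String × Int)) : Decidable (Spec_spread_dense_layers_py node_layers max_per_layer graph out) := by unfold Spec_spread_dense_layers_py; infer_instance

-- ===== CLAIM (what is proved, stated in full; the proofs are below) =====
def Claim_equal_spread_dense_layers_py : Prop := ∀ (node_layers : List (String × Int)) (max_per_layer : Int) (graph : Option (List (String × List (String × List String)))), Dom_spread_dense_layers_py node_layers max_per_layer graph → Pre_spread_dense_layers_py node_layers max_per_layer graph → Spec_spread_dense_layers_py node_layers max_per_layer graph (spread_dense_layers_py node_layers max_per_layer graph)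

-- ===== LEMMAS AND PROOFS =====

theorem pv_map_insertBy {α β : Type} (f : α → β) (p : β → β → Bool) (x : α) :
    ∀ (ys : List α),
      PySem.List.insertBy p (f x) (ys.map f)
        = (PySem.List.insertBy (fun a b => p (f a) (f b)) x ys).map f := by
  intro ys
  induction ys with
  | nil => simp [PySem.List.insertBy]
  | cons y ys ih =>
      simp only [List.map_cons, PySem.List.insertBy]
      by_cases h : p (f x) (f y) = true
      · simp [h]
      · simp [h, ih]

theorem pv_sorted_map {α β : Type} (f : α → β) (key : β → Int) (xs : List α) :
    PySem.List.sorted (xs.map f) key false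
      = (PySem.List.sorted xs (fun a => key (f a)) false).map f := by
  rw [PySem.List.sorted_eq_foldl_insertBy, PySem.List.sorted_eq_foldl_insertBy]
  have : ∀ (xs : List α) (acc : List α),
      (xs.map f).foldl (fun acc x => PySem.List.insertBy (fun a b => decide (key a < key b)) x acc) (acc.map f)
        = (xs.foldl (fun acc x => PySem.List.insertBy (fun a b => decide (key (f a) < key (f b))) x acc) acc).map f := by
    intro xs
    induction xs with
    | nil => intro acc; simp
    | cons x xs ih =>
        intro acc
        simp only [List.map_cons, List.foldl_cons]
        rw [pv_map_insertBy f (fun a b => decide (key a < key b)) x acc, ih]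
  simpa using this xs []

-- sorting by the negated key ascending = sorting by the key descending (A vs B's dense sort)
theorem pv_sorted_neg_eq_rev {α : Type} (xs : List α) (key : α → Int) :
    PySem.List.sorted xs (fun a => -key a) false = PySem.List.sorted xs key true := by
  rw [PySem.List.sorted_eq_foldl_insertBy, PySem.List.sorted_rev_eq_foldl_insertBy]
  have : (fun (a b : α) => decide (-key a < -key b)) = fun a b => decide (key b < key a) := by
    funext a b; simp
  rw [this]

-- i // M = 0 for 0 ≤ i < M
theorem pv_floordiv_zero (i M : Int) (h0 : 0 ≤ i) (h1 : i < M) :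
    PySem.Int.floordiv i M = 0 := by
  rw [PySem.Int.floordiv_eq_iff_of_pos (by omega)]; omega

-- ceil(len/M) = 1 for 1 ≤ len ≤ M
theorem pv_num_one (len M : Int) (h0 : 1 ≤ len) (h1 : len ≤ M) :
    PySem.Int.floordiv (len + M - 1) M = 1 := by
  rw [PySem.Int.floordiv_eq_iff_of_pos (by omega)]; constructor <;> nlinarith

-- sparse layer: the uniform enumerate-fold collapses to plain inserts at layer k + c
theorem pv_enum_fold_sparse (M : Int) (c : Int) :
    ∀ (nodes : List String) (s : Int) (d : PySem.Dict String Int),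
      0 ≤ s → s + nodes.length ≤ M →
      (PySem.List.enumerate nodes s).foldl
          (fun d p => d.insert p.2 (c + PySem.Int.floordiv p.1 M)) d
        = nodes.foldl (fun d node => d.insert node c) d := by
  intro nodes
  induction nodes with
  | nil => intro s d _ _; simp [PySem.List.enumerate]
  | cons n ns ih =>
      intro s d hs hM
      simp only [PySem.List.enumerate, List.foldl_cons]
      rw [pv_floordiv_zero s M hs (by simp at hM; omega), add_zero]
      exact ih (s + 1) _ (by omega) (by simp at hM ⊢; omega)

-- one layer: A's step = B's emitted pairs folded in, offset advanced by B's num - 1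
theorem pv_step_eq (lc : PySem.Dict Int (List String)) (M : Int)
    (G : Option (List (String × List (String × List String))))
    (k : Int) (hne : lc.getD k [] ≠ [])
    (d : PySem.Dict String Int) (o : Int) :
    pvStepA lc M G (d, o) k
      = (((PySem.List.enumerate (pvLayerNodes lc M G k)).map
            (fun p => (p.2, k + o + PySem.Int.floordiv p.1 M))).foldl
            (fun d p => d.insert p.1 p.2) d,
         o + (pvLayerNum lc M G k - 1)) := by
  have hfold : ∀ (ns : List String),
      ((PySem.List.enumerate ns).map
          (fun p => (p.2, k + o + PySem.Int.floordiv p.1 M))).foldl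
          (fun d p => d.insert p.1 p.2) d
        = (PySem.List.enumerate ns).foldl
            (fun d p => d.insert p.2 (k + o + PySem.Int.floordiv p.1 M)) d := by
    intro ns; rw [List.foldl_map]
  by_cases hle : ((lc.getD k []).length : Int) ≤ M
  · -- sparse: no sort, num = 1, every index divides to 0
    have hlen1 : 1 ≤ ((lc.getD k []).length : Int) := by
      have : lc.getD k [] ≠ [] := hne
      cases h : lc.getD k [] with
      | nil => exact absurd h this
      | cons a l => simp
    have hMpos : 0 < M := by omega
    have hnodes : pvLayerNodes lc M G k = lc.getD k [] := by
      unfold pvLayerNodes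
      cases G with
      | none => rfl
      | some g => simp [not_lt.mpr hle]
    have hnum : pvLayerNum lc M G k = 1 := by
      unfold pvLayerNum
      rw [hnodes]; exact pv_num_one _ _ hlen1 hle
    unfold pvStepA
    rw [hfold, hnodes, hnum]
    simp only [hle, if_true]
    rw [pv_enum_fold_sparse M (k + o) (lc.getD k []) 0 d le_rfl (by simpa using hle)]
    simp
  · -- dense: B's reverse sort is A's sort of pairs by -count, same formula and offset
    have hnodes : pvLayerNodes lc M G k
        = (match G with
           | some g =>
               if g.isEmpty then lc.getD k []
               else ((PySem.List.sorted ((lc.getD k []).map (fun node => (node, pvConn g node)))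
                        (fun x => -x.2) false).map (·.1))
           | none => lc.getD k []) := by
      unfold pvLayerNodes
      cases G with
      | none => rfl
      | some g =>
          by_cases hg : g.isEmpty
          · simp [hg, not_le.mp hle]
          · simp only [hg, not_le.mp hle, Bool.not_false, decide_true, Bool.and_true,
              if_true, Bool.false_eq_true, if_false]
            rw [pv_sorted_map (fun node => (node, pvConn g node)) (fun x : String × Int => -x.2)]
            rw [pv_sorted_neg_eq_rev]
            simp [Function.comp_def]
    unfold pvStepA pvLayerNum
    rw [hfold, hnodes]
    cases G with
    | none => simp [hle]
    | some g =>
        by_cases hg : g.isEmpty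
        · simp [hle, hg]
        · simp [hle, hg, PySem.List.length_sorted]

-- whole fold: A's loop over the sorted keys = folding B's emitted pair list into the dict
theorem pv_fold_eq (lc : PySem.Dict Int (List String)) (M : Int)
    (G : Option (List (String × List (String × List String)))) :
    ∀ (ks : List Int), (∀ k ∈ ks, lc.getD k [] ≠ []) →
      ∀ (d : PySem.Dict String Int) (o : Int),
        (ks.foldl (pvStepA lc M G) (d, o)).1
          = (pvEmit lc M G ks o).foldl (fun d p => d.insert p.1 p.2) d := by
  intro ks
  induction ks with
  | nil => intro _ d o; simp [pvEmit]
  | cons k ks ih =>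
      intro hne d o
      show ((ks.foldl (pvStepA lc M G) (pvStepA lc M G (d, o) k))).1 = _
      rw [pv_step_eq lc M G k (hne k (by simp)) d o,
        ih (fun k hk => hne k (by simp [hk]))]
      simp [pvEmit, List.foldl_append]

-- every group the grouping pass builds is nonempty
theorem pv_group_ne (nl : List (String × Int)) :
    ∀ k ∈ (pvGroup nl).keys, (pvGroup nl).getD k [] ≠ [] := by
  unfold pvGroup
  generalize (PySem.Dict.ofList nl).items = ps
  have : ∀ (ps : List (String × Int)) (d : PySem.Dict Int (List String)),
      (∀ k ∈ d.keys, d.getD k [] ≠ []) →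
      ∀ k ∈ (ps.foldl (fun d p => d.modify p.2 [] (· ++ [p.1])) d).keys,
        (ps.foldl (fun d p => d.modify p.2 [] (· ++ [p.1])) d).getD k [] ≠ [] := by
    intro ps
    induction ps with
    | nil => intro d h; exact h
    | cons p ps ih =>
        intro d h
        simp only [List.foldl_cons]
        refine ih _ ?_
        intro k hk
        rw [PySem.Dict.getD_modify]
        split_ifs with hkk
        · simp
        · refine h k ?_
          have h3 : k = p.2 ∨ k ∈ d.keys := by
            simpa [PySem.Dict.modify, PySem.Dict.mem_keys_insert] using hk
          rcases h3 with h' | h'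
          · exact absurd h' hkk
          · exact h'
  intro k hk
  exact this ps PySem.Dict.empty (by simp) k hk

-- ===== VERDICT (by name: the statement is the Claim_ definition above) =====
theorem spread_dense_layers_py_spec : Claim_equal_spread_dense_layers_py := by
  intro node_layers max_per_layer graph _ hpre
  unfold Spec_spread_dense_layers_py
  rcases hpre with hM | hnil
  · simp only [spread_dense_layers_py, spread_dense_layers_py_alt]
    rw [pv_fold_eq (pvGroup node_layers) max_per_layer graph _
        (fun k hk => pv_group_ne node_layers k ((PySem.List.mem_sorted _ _ _ _).mp hk))]
    rfl
  · subst hnil; rfl
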